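-- pv_equiv track=rewrite | github.com/AlexeyNikitin01/CareerProgLackmann | глава 9 1 массивы и строки/1_1.py | is_duplicate_letter_2
-- ===== SOURCE A (Python) =====
-- def is_duplicate_letter_2(word: str) -> bool:
--     if len(word) < 2:
--         return False
--     sorted_word = ''.join(sorted([i for i in word]))
--     for i in range(1, len(word)):
--         if sorted_word[i] == sorted_word[i-1]:
--             return False
--     return True
-- ===== SOURCE B (Python) =====
-- def is_duplicate_letter_2(word: str) -> bool:
--     if len(word) < 2:
--         return False
--     seen = set()
--     for ch in word:
--         if ch in seen:
--             return False
--         seen.add(ch)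
--     return True
-- ===== Notes on version B (the rewrite author's own statement) =====
-- stated objective: faster
-- what changed: Replaces A's sort-then-adjacent-pair scan with a single pass over the characters keeping a set of seen letters, returning False at the first repeat.
import Mathlib
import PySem

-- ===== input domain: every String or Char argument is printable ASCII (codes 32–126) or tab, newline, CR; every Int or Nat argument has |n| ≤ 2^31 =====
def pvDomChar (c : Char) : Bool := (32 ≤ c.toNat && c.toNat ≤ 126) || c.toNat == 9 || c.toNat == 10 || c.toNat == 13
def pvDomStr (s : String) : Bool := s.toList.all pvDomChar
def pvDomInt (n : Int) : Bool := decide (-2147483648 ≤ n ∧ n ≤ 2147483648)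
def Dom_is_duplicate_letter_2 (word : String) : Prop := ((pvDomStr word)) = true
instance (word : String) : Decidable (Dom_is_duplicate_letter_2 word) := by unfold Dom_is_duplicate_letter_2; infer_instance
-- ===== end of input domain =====

-- B replaces A's sort-then-adjacent-pair scan by a single pass with a set of seen letters (faster).

-- ===== PORT A =====
-- the for-loop over range(1, len(word)) with its early 'return False'
-- (''.join of the sorted chars then string indexing is ported as indexing the sorted char list — exact)
def pvLoopA (sw : List Char) : List Int → Bool
  | [] => true
  | i :: rest =>
    if PySem.List.pyGetD sw i ' ' == PySem.List.pyGetD sw (i - 1) ' ' then false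
    else pvLoopA sw rest

def is_duplicate_letter_2 (word : String) : Bool :=
  if PySem.Str.len word < 2 then false
  else
    let sorted_word := PySem.List.sorted (word.toList.map (fun i => i)) (fun x => x) false
    pvLoopA sorted_word (PySem.List.pyRange 1 (PySem.Str.len word) 1)

-- ===== PORT B =====
-- the for-loop over the characters with the running 'seen' set and early 'return False'
def pvLoopB (seen : PySem.Set Char) : List Char → Bool
  | [] => true
  | c :: rest =>
    if PySem.Set.contains seen c then false
    else pvLoopB (PySem.Set.add seen c) rest

def is_duplicate_letter_2_alt (word : String) : Bool :=
  if PySem.Str.len word < 2 then false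
  else pvLoopB PySem.Set.empty word.toList

-- ===== PRECONDITION & SPEC =====
def Spec_is_duplicate_letter_2 (word : String) (out : Bool) : Prop := out = is_duplicate_letter_2_alt word
instance (word : String) (out : Bool) : Decidable (Spec_is_duplicate_letter_2 word out) := by unfold Spec_is_duplicate_letter_2; infer_instance

-- ===== CLAIM (what is proved, stated in full; the proofs are below) =====
def Claim_equal_is_duplicate_letter_2 : Prop := ∀ (word : String), Dom_is_duplicate_letter_2 word → Spec_is_duplicate_letter_2 word (is_duplicate_letter_2 word)

-- ===== LEMMAS AND PROOFS =====

-- B's loop succeeds iff the list is duplicate-free and disjoint from 'seen'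
theorem pvLoopB_true_iff (l : List Char) : ∀ (seen : PySem.Set Char),
    pvLoopB seen l = true ↔ l.Nodup ∧ ∀ c ∈ l, c ∉ seen := by
  induction l with
  | nil => intro seen; simp [pvLoopB]
  | cons c rest ih =>
    intro seen
    simp only [pvLoopB]
    by_cases h : PySem.Set.contains seen c = true
    · have hc : c ∈ seen := (PySem.Set.contains_iff seen c).mp h
      simp [hc]
    · have hc : c ∉ seen := fun hm => h ((PySem.Set.contains_iff seen c).mpr hm)
      rw [if_neg h, ih]
      constructor
      · rintro ⟨hnd, hdisj⟩
        have hcr : c ∉ rest := fun hm => (hdisj c hm) ((PySem.Set.mem_add seen c c).mpr (Or.inr rfl))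
        refine ⟨List.nodup_cons.mpr ⟨hcr, hnd⟩, ?_⟩
        intro x hx
        rcases List.mem_cons.mp hx with rfl | hx
        · exact hc
        · intro hxs
          exact (hdisj x hx) ((PySem.Set.mem_add seen c x).mpr (Or.inl hxs))
      · rintro ⟨hnd, hdisj⟩
        rcases List.nodup_cons.mp hnd with ⟨hcr, hnd'⟩
        refine ⟨hnd', ?_⟩
        intro x hx hxadd
        rcases (PySem.Set.mem_add seen c x).mp hxadd with hxs | hxc
        · exact (hdisj x (List.mem_cons_of_mem c hx)) hxs
        · exact hcr (hxc ▸ hx)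

-- A's index loop over range(k, n) is the adjacent-pair scan of the dropped suffix
theorem pvLoopA_eq_chain (sw : List Char) : ∀ (k : Nat), 1 ≤ k → k ≤ sw.length →
    (pvLoopA sw (PySem.List.pyRange (k : Int) (sw.length : Int) 1) = true ↔
      List.IsChain (fun a b => a ≠ b) (sw.drop (k - 1))) := by
  intro k hk1 hk2
  induction hn : sw.length - k generalizing k with
  | zero =>
    have hkeq : k = sw.length := by omega
    subst hkeq
    rw [PySem.List.pyRange_one_eq_nil (by omega)]
    simp only [pvLoopA]
    have hne : sw ≠ [] := fun h => by simp [h] at hk1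
    rw [List.drop_length_sub_one hne]
    simp
  | succ m ih =>
    have hklt : k < sw.length := by omega
    rw [PySem.List.pyRange_one_cons (by exact_mod_cast hklt)]
    simp only [pvLoopA]
    have hik : ((k : Int) - 1) = ((k - 1 : Nat) : Int) := by omega
    have h1 : PySem.List.pyGetD sw (k : Int) ' ' = sw[k]'hklt := by
      rw [PySem.List.pyGetD_natCast, List.getD_eq_getElem _ _ hklt]
    have h2 : PySem.List.pyGetD sw ((k : Int) - 1) ' ' = sw[k - 1]'(by omega) := by
      rw [hik, PySem.List.pyGetD_natCast, List.getD_eq_getElem _ _ (by omega)]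
    have hkk : k - 1 + 1 = k := by omega
    have hd1 : sw.drop (k - 1) = sw[k - 1]'(by omega) :: sw.drop k := by
      rw [List.drop_eq_getElem_cons (by omega : k - 1 < sw.length), hkk]
    have hd2 : sw.drop k = sw[k]'hklt :: sw.drop (k + 1) := List.drop_eq_getElem_cons hklt
    by_cases heq : sw[k]'hklt = sw[k - 1]'(by omega : k - 1 < sw.length)
    · rw [if_pos (by simp [h1, h2, heq])]
      rw [hd1, hd2, List.isChain_cons_cons]
      simp [heq]
    · rw [if_neg (by simp [h1, h2, heq])]
      have hcast : ((k : Int) + 1) = ((k + 1 : Nat) : Int) := by push_cast; ring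
      rw [hcast, ih (k + 1) (by omega) (by omega) (by omega)]
      simp only [Nat.add_sub_cancel]
      rw [hd1, hd2, List.isChain_cons_cons]
      exact ⟨fun h => ⟨fun hab => heq hab.symm, h⟩, And.right⟩

-- on a ≤-sorted list, an adjacent-distinct chain is strictly increasing
theorem chain_lt_of_chain_ne (sw : List Char) (hpw : sw.Pairwise (· ≤ ·))
    (hch : List.IsChain (fun a b : Char => a ≠ b) sw) :
    List.IsChain (fun a b : Char => a < b) sw := by
  induction sw with
  | nil => simp
  | cons a t ih =>
    cases t with
    | nil => simp
    | cons b t' =>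
      rw [List.isChain_cons_cons] at hch ⊢
      refine ⟨lt_of_le_of_ne ?_ hch.1,
        ih (hpw.sublist (List.sublist_cons_self _ _)) hch.2⟩
      exact (List.pairwise_cons.mp hpw).1 b (by simp)

-- on a ≤-sorted list, no adjacent duplicates ↔ no duplicates at all
theorem chain_ne_iff_nodup (sw : List Char) (hpw : sw.Pairwise (· ≤ ·)) :
    List.IsChain (fun a b : Char => a ≠ b) sw ↔ sw.Nodup := by
  constructor
  · intro hch
    have hlt := chain_lt_of_chain_ne sw hpw hch
    exact (List.isChain_iff_pairwise.mp hlt).imp ne_of_lt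
  · intro hnd
    exact List.Pairwise.isChain hnd

theorem is_duplicate_letter_2_spec : Claim_equal_is_duplicate_letter_2 := by
  intro word _
  unfold Spec_is_duplicate_letter_2 is_duplicate_letter_2 is_duplicate_letter_2_alt
  by_cases hlen : PySem.Str.len word < 2
  · rw [if_pos hlen, if_pos hlen]
  · rw [if_neg hlen, if_neg hlen]
    set l := word.toList with hl
    have hlen' : 2 ≤ l.length := by
      rw [PySem.Str.len_eq, ← hl] at hlen
      omega
    set sw := PySem.List.sorted (l.map (fun i => i)) (fun x => x) false with hsw
    have hmap : l.map (fun i => i) = l := List.map_id' l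
    have hperm : sw.Perm l := by rw [hsw, hmap]; exact PySem.List.sorted_perm _ _ _
    have hswlen : sw.length = l.length := hperm.length_eq
    have hpw : sw.Pairwise (· ≤ ·) := by
      rw [hsw]; exact PySem.List.sorted_pairwise _ _
    have hlenw : PySem.Str.len word = (l.length : Int) := by
      rw [PySem.Str.len_eq, ← hl]
    have hA : pvLoopA sw (PySem.List.pyRange 1 (PySem.Str.len word) 1) = true ↔ l.Nodup := by
      rw [hlenw, ← hswlen]
      have h := pvLoopA_eq_chain sw 1 (by omega) (by omega)
      rw [Nat.cast_one] at h
      rw [h]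
      simp only [Nat.sub_self, List.drop_zero]
      rw [chain_ne_iff_nodup sw hpw]
      exact ⟨hperm.nodup_iff.mp, hperm.nodup_iff.mpr⟩
    have hB : pvLoopB PySem.Set.empty l = true ↔ l.Nodup := by
      rw [pvLoopB_true_iff]
      simp [PySem.Set.empty]
    rw [Bool.eq_iff_iff, hA, hB]
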